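-- pv_equiv track=rewrite | github.com/pierceDon/webscraping | baylorstats.py | worst
-- ===== SOURCE A (Python) =====
-- def worst(arg):
--     value = min(list(map(lambda x: x[1], arg)))
--     for [x, y] in arg:
--         if y == value:
--             year = x
--         else:
--             pass
--     return value, year
-- ===== SOURCE B (Python) =====
-- def worst(arg):
--     rows = iter(arg)
--     x, y = next(rows)
--     value, year = y, x
--     for x, y in rows:
--         if y <= value:
--             value, year = y, x
--     return value, year
-- ===== Notes on version B (the rewrite author's own statement) =====
-- stated objective: simpler
-- what changed: Replaces A's staged passes (map out the second components, min() over them, then rescan the whole list for the last row matching the min) by a single forward pass with a (value, year) accumulator, updating on y <= value so the last occurrence of the minimum wins.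
import Mathlib
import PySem

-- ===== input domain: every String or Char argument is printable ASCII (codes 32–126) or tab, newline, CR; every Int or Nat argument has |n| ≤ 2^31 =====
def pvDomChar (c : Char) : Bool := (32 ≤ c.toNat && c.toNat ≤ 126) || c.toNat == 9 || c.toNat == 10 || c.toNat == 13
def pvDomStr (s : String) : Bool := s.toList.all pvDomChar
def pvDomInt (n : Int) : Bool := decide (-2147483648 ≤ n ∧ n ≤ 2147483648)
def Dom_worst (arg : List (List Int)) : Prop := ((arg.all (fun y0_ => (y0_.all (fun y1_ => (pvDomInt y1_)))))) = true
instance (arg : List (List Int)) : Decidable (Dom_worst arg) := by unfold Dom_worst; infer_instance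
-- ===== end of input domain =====

-- B replaces A's staged passes (min over the mapped second components, then a full rescan
-- for the last matching year) by a single forward pass with a (value, year) accumulator.


-- ===== PORT A =====
-- value = min(map(lambda x: x[1], arg)); then 'for [x, y] in arg: if y == value: year = x'.
-- pyGet?'s .getD 0 and the none/_ fallbacks are only reached where Python raises (outside Pre_).
def worst (arg : List (List Int)) : Int × Int :=
  match PySem.List.min? (arg.map (fun x => ((PySem.List.pyGet? x 1).getD 0))) (fun v => v) with
  | none => (0, 0)          -- min([]) raises ValueError: excluded by Pre_
  | some value =>
      let year := arg.foldl (fun year r =>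
        match r with
        | [x, y] => if y = value then x else year   -- 'for [x, y] in arg' unpacks a 2-list
        | _ => year) 0      -- unpacking raises on other lengths: excluded by Pre_
      (value, year)

-- ===== PORT B =====
-- rows = iter(arg); x, y = next(rows); value, year = y, x;
-- for x, y in rows: if y <= value: value, year = y, x;  return value, year
-- 'x, y = <2-list>' unpacking is ported as an explicit length-2 check plus pyGet? 0 / pyGet? 1
-- (exact where Python succeeds; other lengths raise in Python and are excluded by Pre_,
-- as is the empty arg, on which next() raises StopIteration).
def pvUnpack2 (s : List Int) : Option (Int × Int) :=
  if s.length = 2 then some ((PySem.List.pyGet? s 0).getD 0, (PySem.List.pyGet? s 1).getD 0)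
  else none

def worst_alt (arg : List (List Int)) : Int × Int :=
  ((PySem.List.pyGet? arg 0).bind pvUnpack2).elim (0, 0) (fun (x0, y0) =>
    arg.tail.foldl (fun p s =>
      (pvUnpack2 s).elim p (fun (x, y) => if y ≤ p.1 then (y, x) else p)) (y0, x0))

-- ===== PRECONDITION & SPEC =====
-- Pre_ excludes exactly the inputs on which Python A raises: the empty list (ValueError from
-- min) and any row whose length is not 2 (IndexError for length < 2, ValueError from the
-- 'for [x, y]' unpacking for length > 2).
def Pre_worst (arg : List (List Int)) : Prop := arg ≠ [] ∧ ∀ r ∈ arg, r.length = 2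
instance (arg : List (List Int)) : Decidable (Pre_worst arg) := by unfold Pre_worst; infer_instance
def pvWitness_worst : List (List Int) := [[2020, 5], [2021, 3], [2022, 3]]

def Spec_worst (arg : List (List Int)) (out : Int × Int) : Prop := out = worst_alt arg
instance (arg : List (List Int)) (out : Int × Int) : Decidable (Spec_worst arg out) := by unfold Spec_worst; infer_instance

-- ===== CLAIM (what is proved, stated in full; the proofs are below) =====
def Claim_equal_worst : Prop := ∀ (arg : List (List Int)), Dom_worst arg → Pre_worst arg → Spec_worst arg (worst arg)

-- ===== LEMMAS AND PROOFS =====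

-- projections of a row
def pvKey (r : List Int) : Int := (PySem.List.pyGet? r 1).getD 0
def pvVal (r : List Int) : Int := (PySem.List.pyGet? r 0).getD 0

-- a length-2 row is literally [x, y]
lemma row_shape (r : List Int) (h : r.length = 2) : r = [pvVal r, pvKey r] := by
  match r, h with
  | [a, b], _ => simp [pvVal, pvKey, PySem.List.pyGet?, PySem.List.pyIdx?]

-- A's year loop rewritten with the projections (valid on length-2 rows)
lemma loopA_eq (arg : List (List Int)) (h : ∀ r ∈ arg, r.length = 2) (value y0 : Int) :
    arg.foldl (fun year r =>
      match r with
      | [x, y] => if y = value then x else year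
      | _ => year) y0
    = arg.foldl (fun year r => if pvKey r = value then pvVal r else year) y0 := by
  apply PySem.List.foldl_congr_mem
  intro acc r hr
  rw [row_shape r (h r hr)]
  simp [pvKey, pvVal, PySem.List.pyGet?, PySem.List.pyIdx?]

-- B's pair loop rewritten with the projections (valid on length-2 rows)
-- unpacking a length-2 row yields its projections
lemma unpack2_eq (r : List Int) (h : r.length = 2) : pvUnpack2 r = some (pvVal r, pvKey r) := by
  simp [pvUnpack2, h, pvVal, pvKey]

-- B's pair loop rewritten with the projections (valid on length-2 rows)
lemma loopB_eq (rows : List (List Int)) (h : ∀ r ∈ rows, r.length = 2) (p0 : Int × Int) :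
    rows.foldl (fun p s =>
      (pvUnpack2 s).elim p (fun (x, y) => if y ≤ p.1 then (y, x) else p)) p0
    = rows.foldl (fun p s => if pvKey s ≤ p.1 then (pvKey s, pvVal s) else p) p0 := by
  apply PySem.List.foldl_congr_mem
  intro acc r hr
  rw [unpack2_eq r (h r hr)]
  rfl

-- the single pass computes (running min of keys, last year whose key equals that min)
lemma pass_spec (rows : List (List Int)) (v0 y0 : Int) :
    rows.foldl (fun p s => if pvKey s ≤ p.1 then (pvKey s, pvVal s) else p) (v0, y0)
    = (rows.foldl (fun v s => min v (pvKey s)) v0,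
       rows.foldl (fun y s => if pvKey s = rows.foldl (fun v s => min v (pvKey s)) v0
                              then pvVal s else y) y0) := by
  induction rows using List.reverseRecOn with
  | nil => simp
  | append_singleton t r ih =>
    simp only [List.foldl_append, List.foldl_cons, List.foldl_nil, ih]
    by_cases hle : pvKey r ≤ t.foldl (fun v s => min v (pvKey s)) v0
    · have hm : min (t.foldl (fun v s => min v (pvKey s)) v0) (pvKey r) = pvKey r :=
        min_eq_right hle
      simp [hle]
    · have hlt : t.foldl (fun v s => min v (pvKey s)) v0 < pvKey r := lt_of_not_ge hle
      have hm : min (t.foldl (fun v s => min v (pvKey s)) v0) (pvKey r) =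
          t.foldl (fun v s => min v (pvKey s)) v0 := min_eq_left (le_of_lt hlt)
      have hne : pvKey r ≠ t.foldl (fun v s => min v (pvKey s)) v0 := ne_of_gt hlt
      simp [hle, hm, hne]

-- if the target value occurs among the keys, the last-match fold ignores its initial value
lemma lastmatch_init_irrel (rows : List (List Int)) (m : Int)
    (h : ∃ r ∈ rows, pvKey r = m) (y0 y1 : Int) :
    rows.foldl (fun y s => if pvKey s = m then pvVal s else y) y0
    = rows.foldl (fun y s => if pvKey s = m then pvVal s else y) y1 := by
  induction rows generalizing y0 y1 with
  | nil => obtain ⟨r, hr, _⟩ := h; cases hr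
  | cons a t ih =>
    simp only [List.foldl_cons]
    by_cases ha : pvKey a = m
    · simp [ha]
    · obtain ⟨r, hr, hrm⟩ := h
      rcases List.mem_cons.mp hr with rfl | hrt
      · exact absurd hrm ha
      · exact ih ⟨r, hrt, hrm⟩ _ _

-- the fold of min over mapped keys equals the fused fold
lemma foldl_min_map (rows : List (List Int)) (v0 : Int) :
    (rows.map pvKey).foldl min v0 = rows.foldl (fun v s => min v (pvKey s)) v0 := by
  induction rows generalizing v0 with
  | nil => rfl
  | cons a t ih => simp only [List.map_cons, List.foldl_cons, ih]

-- the running min is its seed or is attained by some row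
lemma foldl_min_attained (rows : List (List Int)) (v0 : Int) :
    rows.foldl (fun v s => min v (pvKey s)) v0 = v0 ∨
    ∃ r ∈ rows, pvKey r = rows.foldl (fun v s => min v (pvKey s)) v0 := by
  rw [← foldl_min_map]
  rcases PySem.List.foldl_min_mem (rows.map pvKey) v0 with h1 | h1
  · exact Or.inl h1
  · obtain ⟨r, hr, hrk⟩ := List.mem_map.mp h1
    exact Or.inr ⟨r, hr, hrk⟩

-- ===== VERDICT (by name: the statement is the Claim_ definition above) =====
theorem worst_spec : Claim_equal_worst := by
  intro arg _ hpre
  obtain ⟨hne, hlen⟩ := hpre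
  match arg, hne with
  | r :: rows, _ =>
    obtain ⟨a, b, rfl⟩ : ∃ a b, r = [a, b] := by
      have h := hlen r List.mem_cons_self
      match r, h with
      | [a, b], _ => exact ⟨a, b, rfl⟩
    have hrows2 : ∀ s ∈ rows, s.length = 2 :=
      fun s hs => hlen s (List.mem_cons_of_mem _ hs)
    have hkey : pvKey [a, b] = b := by simp [pvKey, PySem.List.pyGet?, PySem.List.pyIdx?]
    have hval : pvVal [a, b] = a := by simp [pvVal, PySem.List.pyGet?, PySem.List.pyIdx?]
    unfold Spec_worst
    set m := rows.foldl (fun v s => min v (pvKey s)) b with hm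
    have hmap : ([a, b] :: rows).map (fun x => ((PySem.List.pyGet? x 1).getD 0)) =
        b :: rows.map pvKey := by
      simp [pvKey, PySem.List.pyGet?, PySem.List.pyIdx?]
    have hmin : PySem.List.min? (([a, b] :: rows).map (fun x => ((PySem.List.pyGet? x 1).getD 0)))
        (fun v => v) = some m := by
      rw [hmap, PySem.List.min?_id_cons, foldl_min_map]
    have hA : worst ([a, b] :: rows) =
        (m, ([a, b] :: rows).foldl (fun y s => if pvKey s = m then pvVal s else y) 0) := by
      unfold worst
      rw [hmin]
      exact congrArg _ (loopA_eq ([a, b] :: rows) hlen m 0)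
    have hB : worst_alt ([a, b] :: rows) = (m,
        rows.foldl (fun y s => if pvKey s = m then pvVal s else y) a) := by
      unfold worst_alt
      have h0 : PySem.List.pyGet? ([a, b] :: rows) 0 = some [a, b] := by
        simp [PySem.List.pyGet?, PySem.List.pyIdx?]
      have h1 : pvUnpack2 [a, b] = some (a, b) := by
        simp [pvUnpack2, PySem.List.pyGet?, PySem.List.pyIdx?]
      simp only [h0, Option.bind_some, h1, Option.elim_some, List.tail_cons]
      rw [loopB_eq rows hrows2, pass_spec]
    rw [hA, hB]
    simp only [List.foldl_cons, hkey, hval, Prod.mk.injEq, true_and]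
    by_cases hb : b = m
    · simp [hb]
    · simp only [hb, if_false]
      rcases foldl_min_attained rows b with h0 | h0
      · exact absurd (hm.trans h0).symm hb
      · exact lastmatch_init_irrel rows m (by rw [hm]; exact h0) 0 a
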